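-- pv_equiv track=rewrite | github.com/ashleytsmith/Automating_materials_modelling | searching_algorithms/example_1_fast_neighbour_search/benchmarking.py | genertate_bin_shapes
-- ===== SOURCE A (Python) =====
-- def genertate_bin_shapes(base_bins_shape,reps):
--
--     bins_shapes = []
--
--     current_bins_shape = base_bins_shape
--
--     bins_shapes.append(current_bins_shape)
--
--     reps = reps - 1
--
--     for i in range(0,reps):
--
--         current_bins_shape = tuple([2*x for x in current_bins_shape])
--         bins_shapes.append(current_bins_shape)
--
--     return bins_shapes
-- ===== SOURCE B (Python) =====
-- def genertate_bin_shapes(base_bins_shape, reps):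
--     return [base_bins_shape] + [tuple(x << i for x in base_bins_shape)
--                                 for i in range(1, reps)]
-- ===== Notes on version B (the rewrite author's own statement) =====
-- stated objective: alternative
-- what changed: Replaces the sequential accumulator (each row doubled from the previous) by an independent closed-form row 2^i * base for each i in range(1, reps).
import Mathlib
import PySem

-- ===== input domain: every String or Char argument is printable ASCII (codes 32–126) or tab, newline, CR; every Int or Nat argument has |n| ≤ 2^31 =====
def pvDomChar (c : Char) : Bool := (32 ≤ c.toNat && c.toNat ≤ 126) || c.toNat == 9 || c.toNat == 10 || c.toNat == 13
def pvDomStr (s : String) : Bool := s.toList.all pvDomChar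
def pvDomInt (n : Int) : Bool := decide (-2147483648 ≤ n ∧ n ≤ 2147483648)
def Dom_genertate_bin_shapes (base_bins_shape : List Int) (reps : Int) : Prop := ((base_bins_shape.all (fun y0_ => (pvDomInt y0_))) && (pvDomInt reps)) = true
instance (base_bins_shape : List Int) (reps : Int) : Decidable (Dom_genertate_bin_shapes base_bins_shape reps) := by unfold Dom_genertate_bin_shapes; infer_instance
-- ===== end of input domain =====

-- B builds each row independently as 2^i * base (closed form, via shift) instead of A's running doubled accumulator; objective: alternative decomposition, same cost.

-- ===== PORT A =====
def genertate_bin_shapes (base_bins_shape : List Int) (reps : Int) : List (List Int) :=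
  let bins_shapes : List (List Int) := []
  let current_bins_shape := base_bins_shape
  let bins_shapes := bins_shapes ++ [current_bins_shape]
  let reps := reps - 1
  let st := (PySem.List.pyRange 0 reps 1).foldl
    (fun (st : List (List Int) × List Int) _ =>
      let current_bins_shape := st.2.map (fun x => 2 * x)
      (st.1 ++ [current_bins_shape], current_bins_shape))
    (bins_shapes, current_bins_shape)
  st.1

-- ===== PORT B =====
def genertate_bin_shapes_alt (base_bins_shape : List Int) (reps : Int) : List (List Int) :=
  [base_bins_shape] ++ (PySem.List.pyRange 1 reps 1).map
    (fun i => base_bins_shape.map (fun x => x * 2 ^ i.toNat))  -- x << i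

-- ===== PRECONDITION & SPEC =====
def Spec_genertate_bin_shapes (base_bins_shape : List Int) (reps : Int) (out : List (List Int)) : Prop := out = genertate_bin_shapes_alt base_bins_shape reps
instance (base_bins_shape : List Int) (reps : Int) (out : List (List Int)) : Decidable (Spec_genertate_bin_shapes base_bins_shape reps out) := by unfold Spec_genertate_bin_shapes; infer_instance

-- ===== CLAIM (what is proved, stated in full; the proofs are below) =====
def Claim_equal_genertate_bin_shapes : Prop := ∀ (base_bins_shape : List Int) (reps : Int), Dom_genertate_bin_shapes base_bins_shape reps → Spec_genertate_bin_shapes base_bins_shape reps (genertate_bin_shapes base_bins_shape reps)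

-- ===== LEMMAS AND PROOFS =====

-- A's loop invariant: folding n steps from current value c appends the rows 2^(k+1)*c, k < n.
theorem pv_fold_doubling (l : List Int) (acc : List (List Int)) (c : List Int) :
    (l.foldl
      (fun (st : List (List Int) × List Int) _ =>
        let cur := st.2.map (fun x => 2 * x)
        (st.1 ++ [cur], cur)) (acc, c)).1
    = acc ++ (List.range l.length).map (fun k => c.map (fun x => 2 ^ (k + 1) * x)) := by
  induction l generalizing acc c with
  | nil => simp
  | cons h t ih =>
      simp only [List.foldl_cons, List.length_cons]
      rw [ih]
      rw [List.range_succ_eq_map]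
      simp only [List.map_cons, List.map_map, List.append_assoc, List.singleton_append]
      congr 2
      · apply List.map_congr_left
        intro k _
        simp only [Function.comp]
        apply List.map_congr_left
        intro x _
        simp only [Function.comp]
        simp [pow_succ]
        ring

theorem genertate_bin_shapes_eq (b : List Int) (reps : Int) :
    genertate_bin_shapes b reps = genertate_bin_shapes_alt b reps := by
  unfold genertate_bin_shapes genertate_bin_shapes_alt
  simp only []
  rw [pv_fold_doubling]
  rw [PySem.List.pyRange_one 0 (reps - 1), PySem.List.pyRange_one 1 reps]
  simp only [List.length_map, List.length_range, List.map_map, List.singleton_append,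
    List.nil_append, Int.sub_zero]
  congr 1
  apply List.map_congr_left
  intro k hk
  simp only [Function.comp]
  have hk' : k < (reps - 1).toNat := List.mem_range.mp hk
  have h1 : ((1 : Int) + (k : Int)).toNat = k + 1 := by omega
  rw [h1]
  apply List.map_congr_left
  intro x _
  ring

-- ===== VERDICT (by name: the statement is the Claim_ definition above) =====
theorem genertate_bin_shapes_spec : Claim_equal_genertate_bin_shapes := by
  intro b reps _
  exact (genertate_bin_shapes_eq b reps).symm ▸ rfl
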